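-- pv_equiv track=rewrite | github.com/ElektroDuck/CDMO_MCCVRP | run_model.py | extract_route
-- ===== SOURCE A (Python) =====
-- def extract_route(row_arr, num_clients, prev=[]):
--     if prev == []:
--         prev = [num_clients,]
--     elif row_arr[prev[-1]] == num_clients:
--         prev.append(num_clients)
--         return prev
--     else:
--         prev.append(row_arr[prev[-1]])
--
--     return extract_route(row_arr, num_clients, prev)
-- ===== SOURCE B (Python) =====
-- def extract_route(row_arr, num_clients, prev=[]):
--     # Stage 1: follow the successor pointers from the start node and collect
--     # the hops into a separate list; Stage 2: glue prev + hops + depot.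
--     start = num_clients if prev == [] else prev[-1]
--     hops = []
--     cur = start
--     while row_arr[cur] != num_clients:
--         cur = row_arr[cur]
--         hops.append(cur)
--     if prev == []:
--         return [num_clients] + hops + [num_clients]
--     prev.extend(hops)
--     prev.append(num_clients)
--     return prev
-- ===== Notes on version B (the rewrite author's own statement) =====
-- stated objective: alternative
-- what changed: Replaces A's self-recursion that mutates/grows the prev accumulator at each call by a two-stage form: a loop that first collects the chain of hops into a separate list, then concatenates prev + hops + depot in one step.
import Mathlib
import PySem

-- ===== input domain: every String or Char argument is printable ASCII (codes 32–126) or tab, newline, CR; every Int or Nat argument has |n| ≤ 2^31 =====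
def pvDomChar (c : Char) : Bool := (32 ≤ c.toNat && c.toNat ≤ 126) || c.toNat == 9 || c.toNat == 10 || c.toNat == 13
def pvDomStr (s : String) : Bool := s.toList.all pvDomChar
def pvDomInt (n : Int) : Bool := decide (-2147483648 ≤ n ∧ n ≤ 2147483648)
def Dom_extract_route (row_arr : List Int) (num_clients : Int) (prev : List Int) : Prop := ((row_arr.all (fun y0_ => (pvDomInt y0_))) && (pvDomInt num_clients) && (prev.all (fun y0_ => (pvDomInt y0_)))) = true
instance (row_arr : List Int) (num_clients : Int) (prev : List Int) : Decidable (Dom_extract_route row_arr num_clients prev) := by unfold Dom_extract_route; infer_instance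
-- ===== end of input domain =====

-- B replaces A's accumulator-growing self-recursion by a two-stage form (collect the hop
-- chain separately, then concatenate prev ++ hops ++ depot); equivalence is about the
-- return value (A and B both append in place to a non-empty passed list).

-- ===== PORT A =====
-- A's recursion may not terminate (cyclic pointers); the port carries fuel, which
-- Pre_extract_route proves sufficient. prev[-1] is total on the non-empty branch,
-- ported as getLastD; pyGet? none = Python's IndexError (outside Pre_).
def extract_route_go (fuel : Nat) (row_arr : List Int) (num_clients : Int) (prev : List Int) : List Int :=
  match fuel with
  | 0 => prev
  | f + 1 =>
    if prev = [] then
      extract_route_go f row_arr num_clients [num_clients]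
    else
      match PySem.List.pyGet? row_arr (prev.getLastD 0) with
      | none => prev  -- IndexError in Python; excluded by Pre_
      | some v =>
        if v = num_clients then prev ++ [num_clients]
        else extract_route_go f row_arr num_clients (prev ++ [v])

def extract_route (row_arr : List Int) (num_clients : Int) (prev : List Int) : List Int :=
  extract_route_go (row_arr.length + prev.length + 3) row_arr num_clients prev

-- ===== PORT B =====
-- Source B's stage 1: the while loop collecting hops, ported as a cons-building recursion on
-- the current index (fuel only because the loop may spin on cycles; none = IndexError).
def extract_route_hops (fuel : Nat) (row_arr : List Int) (num_clients : Int) (cur : Int) : List Int :=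
  match fuel with
  | 0 => []
  | f + 1 =>
    match PySem.List.pyGet? row_arr cur with
    | none => []  -- IndexError in Python; excluded by Pre_
    | some v =>
      if v = num_clients then []
      else v :: extract_route_hops f row_arr num_clients v

-- Source B's stage 2: pick the start node, then concatenate prev ++ hops ++ [num_clients].
def extract_route_alt (row_arr : List Int) (num_clients : Int) (prev : List Int) : List Int :=
  let start := if prev = [] then num_clients else prev.getLastD num_clients
  let hops := extract_route_hops (row_arr.length + 2) row_arr num_clients start
  (if prev = [] then [num_clients] else prev) ++ hops ++ [num_clients]

-- ===== PRECONDITION & SPEC =====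
-- iterated successor pointer: stepN k i = the index reached after k lookups from i (none = IndexError)
def stepN (row_arr : List Int) : Nat → Int → Option Int
  | 0, i => some i
  | k + 1, i =>
    match PySem.List.pyGet? row_arr i with
    | none => none
    | some j => stepN row_arr k j

-- Pre_: following the pointers from the start index (prev's last element, or num_clients if
-- prev is empty), num_clients is reached within |row_arr|+1 successful lookups — exactly the
-- inputs on which A returns (otherwise Python raises IndexError or RecursionError).
def Pre_extract_route (row_arr : List Int) (num_clients : Int) (prev : List Int) : Prop :=
  ∃ k, k < row_arr.length + 2 ∧ 1 ≤ k ∧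
    stepN row_arr k (prev.getLastD num_clients) = some num_clients

instance (row_arr : List Int) (num_clients : Int) (prev : List Int) : Decidable (Pre_extract_route row_arr num_clients prev) := by
  unfold Pre_extract_route; infer_instance

def pvWitness_extract_route : List Int × Int × List Int := ([2, 0, 2], 2, [])

def Spec_extract_route (row_arr : List Int) (num_clients : Int) (prev : List Int) (out : List Int) : Prop := out = extract_route_alt row_arr num_clients prev
instance (row_arr : List Int) (num_clients : Int) (prev : List Int) (out : List Int) : Decidable (Spec_extract_route row_arr num_clients prev out) := by unfold Spec_extract_route; infer_instance

-- ===== CLAIM (what is proved, stated in full; the proofs are below) =====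
def Claim_equal_extract_route : Prop := ∀ (row_arr : List Int) (num_clients : Int) (prev : List Int), Dom_extract_route row_arr num_clients prev → Pre_extract_route row_arr num_clients prev → Spec_extract_route row_arr num_clients prev (extract_route row_arr num_clients prev)

-- ===== LEMMAS AND PROOFS =====

-- With enough fuel on both sides, A's recursion equals acc ++ hops ++ [num_clients].
theorem go_eq_hops (row_arr : List Int) (num_clients : Int) :
    ∀ (k f1 f2 : Nat) (acc : List Int) (cur : Int), acc ≠ [] → acc.getLastD 0 = cur →
      1 ≤ k → k ≤ f1 → k ≤ f2 →
      stepN row_arr k cur = some num_clients →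
      extract_route_go f1 row_arr num_clients acc
        = acc ++ extract_route_hops f2 row_arr num_clients cur ++ [num_clients] := by
  intro k
  induction k with
  | zero => intro f1 f2 acc cur _ _ h1; omega
  | succ m ih =>
    intro f1 f2 acc cur hne hlast _ hf1 hf2 hstep
    obtain ⟨a, f1, rfl⟩ : ∃ a f1', f1 = f1' + 1 := ⟨by omega, f1 - 1, by omega⟩
    obtain ⟨b, f2, rfl⟩ : ∃ b f2', f2 = f2' + 1 := ⟨by omega, f2 - 1, by omega⟩
    simp only [extract_route_go, extract_route_hops, if_neg hne, hlast]
    cases hget : PySem.List.pyGet? row_arr cur with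
    | none => simp [stepN, hget] at hstep
    | some v =>
      simp only [stepN, hget] at hstep
      by_cases hv : v = num_clients
      · simp [hv]
      · simp only [if_neg hv]
        rcases m with _ | m
        · simp [stepN] at hstep; exact absurd hstep hv
        · rw [ih f1 f2 (acc ++ [v]) v (by simp) (by simp) (by omega)
            (by omega) (by omega) hstep]
          simp

theorem getLastD_irrel (l : List Int) (h : l ≠ []) (d d' : Int) :
    l.getLastD d = l.getLastD d' := by
  induction l with
  | nil => exact absurd rfl h
  | cons a t ih =>
    cases t with
    | nil => rfl
    | cons b u => simpa using ih (by simp)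

-- ===== VERDICT (by name: the statement is the Claim_ definition above) =====
theorem extract_route_spec : Claim_equal_extract_route := by
  intro row_arr num_clients prev _ hpre
  obtain ⟨k, hk2, hk1, hstep⟩ := hpre
  unfold Spec_extract_route extract_route extract_route_alt
  by_cases hp : prev = []
  · subst hp
    simp only [List.length_nil]
    show extract_route_go (row_arr.length + 0 + 3) _ _ [] = _
    simp only [extract_route_go]
    exact go_eq_hops row_arr num_clients k (row_arr.length + 0 + 2) (row_arr.length + 2)
      [num_clients] num_clients (by simp) (by simp) hk1 (by omega) (by omega)
      (by simpa using hstep)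
  · simp only [if_neg hp]
    have hl : prev.getLastD 0 = prev.getLastD num_clients := getLastD_irrel prev hp 0 num_clients
    exact go_eq_hops row_arr num_clients k (row_arr.length + prev.length + 3)
      (row_arr.length + 2) prev (prev.getLastD num_clients) hp hl hk1 (by omega)
      (by omega) hstep
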